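-- pv_equiv track=rewrite | github.com/nebogeo/weavingcodes | flotsam/raspberry-pi/weaving.py | run_rule
-- ===== SOURCE A (Python) =====
-- def run_rule(str,rule):
--     ret = ""
--     for i in range(0,len(str)):
--         if str[i:i+len(rule[0])]==rule[0]:
--             ret+=rule[1]
--         else:
--             ret+=str[i]
--     return ret
-- ===== SOURCE B (Python) =====
-- def run_rule(str, rule):
--     pattern = rule[0]
--     repl = rule[1]
--     if not pattern:
--         return repl * len(str)
--     parts = []
--     prev = 0
--     i = str.find(pattern)
--     while i != -1:
--         parts.append(str[prev:i])
--         parts.append(repl)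
--         prev = i + 1
--         i = str.find(pattern, prev)
--     parts.append(str[prev:])
--     return "".join(parts)
-- ===== Notes on version B (the rewrite author's own statement) =====
-- stated objective: faster
-- what changed: A compares a freshly-built slice str[i:i+len(rule[0])] against the pattern at every position; B instead locates match starts with str.find and copies the untouched segments between them wholesale, special-casing the empty pattern with a closed form repl*len(str).
-- outside the precondition, e.g. on run_rule('ab', ['x']): A returns 'ab', B raises IndexError; on run_rule('', []): A returns '', B raises IndexError
import Mathlib
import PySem

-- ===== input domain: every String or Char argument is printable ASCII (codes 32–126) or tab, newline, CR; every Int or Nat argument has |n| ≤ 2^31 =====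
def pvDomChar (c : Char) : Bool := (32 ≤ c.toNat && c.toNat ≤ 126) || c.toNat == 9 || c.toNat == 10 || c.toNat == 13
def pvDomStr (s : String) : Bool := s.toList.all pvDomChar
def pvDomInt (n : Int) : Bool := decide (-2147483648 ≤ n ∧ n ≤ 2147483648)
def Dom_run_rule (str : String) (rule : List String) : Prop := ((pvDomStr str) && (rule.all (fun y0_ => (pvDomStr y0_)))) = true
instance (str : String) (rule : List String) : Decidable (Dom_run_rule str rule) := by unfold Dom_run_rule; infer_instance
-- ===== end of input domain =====

-- B replaces A's per-position slice-and-compare loop by a str.find-driven scan that copies the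
-- untouched segments between match starts in one go (objective: faster, constant-factor).

-- ===== PORT A =====
-- A: for each index i, compare str[i:i+len(rule[0])] with rule[0]; append rule[1] on a match, else str[i].
def run_rule (str : String) (rule : List String) : String :=
  String.mk ((PySem.List.pyRange 0 (PySem.Str.len str) 1).foldl
    (fun ret i =>
      if PySem.Chars.slice str.toList (some i)
           (some (i + PySem.Str.len (PySem.List.pyGetD rule 0 ""))) = (PySem.List.pyGetD rule 0 "").toList
      then ret ++ (PySem.List.pyGetD rule 1 "").toList
      else ret ++ [PySem.List.pyGetD str.toList i ' ']) [])

-- ===== PORT B =====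
-- B's while loop: each turn finds the next match start from `prev`, emits the untouched segment
-- str[prev:i] and the replacement, and continues from i+1.  Fuel (≥ number of turns) only makes
-- the recursion structural; the proof shows s.length + 1 is always enough.
def pvAltGo (s pat rep : List Char) (prev fuel : Nat) : List (List Char) :=
  match fuel with
  | 0 => []
  | f + 1 =>
    let i := PySem.Chars.findFrom s pat (prev : Int)
    if i = -1 then [PySem.Chars.slice s (some (prev : Int)) none]
    else PySem.Chars.slice s (some (prev : Int)) (some i) :: rep :: pvAltGo s pat rep (i.toNat + 1) f

def run_rule_alt (str : String) (rule : List String) : String :=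
  let pat := (PySem.List.pyGetD rule 0 "").toList
  let rep := (PySem.List.pyGetD rule 1 "").toList
  if pat = [] then
    String.mk (PySem.List.pyRepeat rep (PySem.Str.len str))
  else
    String.mk (PySem.Chars.join [] (pvAltGo str.toList pat rep 0 (str.toList.length + 1)))

-- ===== PRECONDITION & SPEC =====
-- Pre_ excludes rules with fewer than two elements: there Python B always raises IndexError
-- (it reads rule[0] and rule[1] up front), while Python A raises on most of them too and
-- returns only accidentally (empty string, or a single-element rule whose pattern never occurs).
def Pre_run_rule (str : String) (rule : List String) : Prop := 2 ≤ rule.length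
instance (str : String) (rule : List String) : Decidable (Pre_run_rule str rule) := by unfold Pre_run_rule; infer_instance
def pvWitness_run_rule : String × List String := ("abcabc", ["bc", "X"])
def Spec_run_rule (str : String) (rule : List String) (out : String) : Prop := out = run_rule_alt str rule
instance (str : String) (rule : List String) (out : String) : Decidable (Spec_run_rule str rule out) := by unfold Spec_run_rule; infer_instance

-- ===== CLAIM (what is proved, stated in full; the proofs are below) =====
def Claim_equal_run_rule : Prop := ∀ (str : String) (rule : List String), Dom_run_rule str rule → Pre_run_rule str rule → Spec_run_rule str rule (run_rule str rule)

-- ===== LEMMAS AND PROOFS =====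

-- Common specification: the per-position result from position k on.
def pvNaive (s pat rep : List Char) (k : Nat) : List Char :=
  if h : k < s.length then
    (if pat <+: s.drop k then rep else [s.getD k ' ']) ++ pvNaive s pat rep (k + 1)
  else []
termination_by s.length - k

lemma pvNaive_stop (s pat rep : List Char) (k : Nat) (hk : s.length ≤ k) :
    pvNaive s pat rep k = [] := by
  rw [pvNaive]; simp [Nat.not_lt.mpr hk]

lemma pvNaive_step (s pat rep : List Char) (k : Nat) (h : k < s.length) :
    pvNaive s pat rep k = (if pat <+: s.drop k then rep else [s.getD k ' ']) ++ pvNaive s pat rep (k + 1) := by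
  rw [pvNaive]; simp [h]

-- A's branch test at a valid index is exactly "pat is a prefix of the suffix".
lemma pvSlice_eq_iff (s pat : List Char) (k : Nat) :
    (PySem.Chars.slice s (some (k : Int)) (some ((k : Int) + (pat.length : Int))) = pat)
      ↔ pat <+: s.drop k := by
  have h1 : (k : Int) + (pat.length : Int) = ((k + pat.length : Nat) : Int) := by push_cast; ring
  rw [h1]
  show PySem.List.slice s _ _ = pat ↔ _
  rw [PySem.List.slice_natCast]
  have h2 : k + pat.length - k = pat.length := by omega
  rw [h2]
  constructor
  · intro h; exact List.prefix_iff_eq_take.mpr h.symm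
  · intro h; exact (List.prefix_iff_eq_take.mp h).symm

-- A's fold equals the per-position specification.
lemma pvA_eq_naive (s pat rep : List Char) (k : Nat) (hk : k ≤ s.length) :
    (PySem.List.pyRange (k : Int) (s.length : Int) 1).flatMap
      (fun i => if PySem.Chars.slice s (some i) (some (i + (pat.length : Int))) = pat
                then rep else [PySem.List.pyGetD s i ' '])
      = pvNaive s pat rep k := by
  by_cases h : k < s.length
  · rw [PySem.List.pyRange_one_cons (by exact_mod_cast h), List.flatMap_cons]
    rw [pvNaive_step s pat rep k h]
    have hrec := pvA_eq_naive s pat rep (k + 1) (by omega)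
    have hc : (k : Int) + 1 = ((k + 1 : Nat) : Int) := by push_cast; ring
    rw [hc, hrec]
    congr 1
    rw [PySem.List.pyGetD_natCast]
    by_cases hm : pat <+: s.drop k
    · rw [if_pos ((pvSlice_eq_iff s pat k).mpr hm), if_pos hm]
    · rw [if_neg (fun hh => hm ((pvSlice_eq_iff s pat k).mp hh)), if_neg hm]
  · have hb : ((s.length : Nat) : Int) ≤ ((k : Nat) : Int) := by exact_mod_cast (by omega : s.length ≤ k)
    rw [PySem.List.pyRange_one_eq_nil hb, pvNaive_stop s pat rep k (by omega)]
    rfl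
termination_by s.length - k

-- No match anywhere from k on: the specification just copies the suffix.
lemma pvNaive_nomatch (s pat rep : List Char) (k : Nat)
    (h : ∀ j, k ≤ j → j < s.length → ¬ pat <+: s.drop j) :
    pvNaive s pat rep k = s.drop k := by
  by_cases hk : k < s.length
  · rw [pvNaive_step s pat rep k hk, if_neg (h k (le_refl _) hk),
      pvNaive_nomatch s pat rep (k + 1) (fun j hj hjl => h j (by omega) hjl)]
    rw [List.drop_eq_getElem_cons hk]
    simp [List.getElem?_eq_getElem hk]
  · rw [pvNaive_stop s pat rep k (by omega), List.drop_eq_nil_of_le (by omega)]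
termination_by s.length - k

-- First match at m, none in [prev, m): the specification is segment ++ rep ++ rest.
lemma pvNaive_segment (s pat rep : List Char) (prev m : Nat) (hm : m < s.length) (hpm : prev ≤ m)
    (hmatch : pat <+: s.drop m) (hno : ∀ j, prev ≤ j → j < m → ¬ pat <+: s.drop j) :
    pvNaive s pat rep prev = (s.drop prev).take (m - prev) ++ rep ++ pvNaive s pat rep (m + 1) := by
  by_cases he : prev = m
  · subst he
    rw [pvNaive_step s pat rep prev hm, if_pos hmatch]
    simp
  · have hlt : prev < m := by omega
    rw [pvNaive_step s pat rep prev (by omega), if_neg (hno prev (le_refl _) hlt)]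
    rw [pvNaive_segment s pat rep (prev + 1) m hm (by omega) hmatch
      (fun j hj hjm => hno j (by omega) hjm)]
    rw [List.drop_eq_getElem_cons (show prev < s.length by omega)]
    have ht : m - prev = (m - (prev + 1)) + 1 := by omega
    rw [ht, List.take_succ_cons]
    simp [List.getElem?_eq_getElem (show prev < s.length by omega)]
termination_by m - prev

-- a prefix of a later suffix is an infix of an earlier suffix
lemma pvPrefix_infix (s pat : List Char) (k j : Nat) (hkj : k ≤ j) (h : pat <+: s.drop j) :
    pat <:+: s.drop k := by
  refine List.infix_iff_prefix_suffix.mpr ⟨s.drop j, h, ?_⟩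
  have : (s.drop k).drop (j - k) = s.drop j := by
    rw [List.drop_drop]
    congr 1
    omega
  rw [← this]
  exact List.drop_suffix _ _

-- "".join with empty separator is concatenation
lemma pvJoin_nil_flatten (ps : List (List Char)) : PySem.Chars.join [] ps = ps.flatten := by
  match ps with
  | [] => rw [PySem.Chars.join_nil, List.flatten_nil]
  | [p] => rw [PySem.Chars.join_singleton, List.flatten_cons, List.flatten_nil, List.append_nil]
  | p :: q :: rest =>
    rw [PySem.Chars.join_cons_cons, pvJoin_nil_flatten (q :: rest), List.flatten_cons]
    simp

-- B's find-loop computes the per-position specification.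
lemma pvAltGo_eq_naive (s pat rep : List Char) (hpat : pat ≠ []) (fuel prev : Nat)
    (hprev : prev ≤ s.length) (hfuel : s.length + 1 - prev ≤ fuel) :
    PySem.Chars.join [] (pvAltGo s pat rep prev fuel) = pvNaive s pat rep prev := by
  induction fuel generalizing prev with
  | zero => omega
  | succ f ih =>
    rw [pvAltGo]
    by_cases hneg : PySem.Chars.findFrom s pat (prev : Int) = -1
    · rw [if_pos hneg, PySem.Chars.join_singleton]
      show PySem.List.slice s _ _ = _
      rw [PySem.List.slice_from_natCast]
      have hni : ¬ pat <:+: s.drop prev :=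
        (PySem.Chars.findFrom_natCast_eq_neg_one_iff s pat prev hprev).mp hneg
      exact (pvNaive_nomatch s pat rep prev
        (fun j hj hjl hp => hni (pvPrefix_infix s pat prev j hj hp))).symm
    · rw [if_neg hneg]
      obtain ⟨hge, hpre, hmin⟩ := PySem.Chars.findFrom_natCast_spec s pat prev hprev hneg
      set i := PySem.Chars.findFrom s pat (prev : Int) with hi
      have hi0 : 0 ≤ i := le_trans (by exact_mod_cast Int.natCast_nonneg prev) hge
      have hgeN : prev ≤ i.toNat := by omega
      have hlen : i.toNat < s.length := by
        by_contra hnl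
        have hd : s.drop i.toNat = [] := List.drop_eq_nil_of_le (by omega)
        rw [hd] at hpre
        exact hpat (List.prefix_nil.mp hpre)
      have hrec := ih (i.toNat + 1) (by omega) (by omega)
      rw [pvJoin_nil_flatten] at hrec ⊢
      simp only [List.flatten_cons, PySem.Chars.slice]
      rw [PySem.List.slice_toNat (a := (prev : Int)) (b := i) (xs := s)
        (by exact_mod_cast Int.natCast_nonneg prev) hi0]
      rw [hrec, pvNaive_segment s pat rep prev i.toNat hlen hgeN hpre
        (fun j hj hjm => hmin j hj hjm)]
      simp

-- empty pattern: every position matches, the result is rep at every position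
lemma pvNaive_nil_pat (s rep : List Char) (k : Nat) :
    pvNaive s [] rep k = (List.replicate (s.length - k) rep).flatten := by
  by_cases hk : k < s.length
  · rw [pvNaive_step s [] rep k hk, if_pos (List.nil_prefix)]
    rw [pvNaive_nil_pat s rep (k + 1)]
    have : s.length - k = (s.length - (k + 1)) + 1 := by omega
    rw [this, List.replicate_succ, List.flatten_cons]
  · rw [pvNaive_stop s [] rep k (by omega)]
    have : s.length - k = 0 := by omega
    rw [this, List.replicate_zero, List.flatten_nil]
termination_by s.length - k

lemma pvA_eq (str : String) (rule : List String) :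
    run_rule str rule = String.mk (pvNaive str.toList
      (PySem.List.pyGetD rule 0 "").toList (PySem.List.pyGetD rule 1 "").toList 0) := by
  unfold run_rule
  congr 1
  rw [PySem.Str.len_eq, PySem.Str.len_eq]
  have hfun : (fun (ret : List Char) (i : Int) =>
      if PySem.Chars.slice str.toList (some i)
           (some (i + ((PySem.List.pyGetD rule 0 "").toList.length : Int))) = (PySem.List.pyGetD rule 0 "").toList
      then ret ++ (PySem.List.pyGetD rule 1 "").toList
      else ret ++ [PySem.List.pyGetD str.toList i ' '])
    = (fun (ret : List Char) (i : Int) => ret ++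
        (if PySem.Chars.slice str.toList (some i)
             (some (i + ((PySem.List.pyGetD rule 0 "").toList.length : Int))) = (PySem.List.pyGetD rule 0 "").toList
         then (PySem.List.pyGetD rule 1 "").toList
         else [PySem.List.pyGetD str.toList i ' '])) := by
    funext ret i; split <;> rfl
  rw [hfun, PySem.List.foldl_append_eq_flatMap]
  have h0 : (0 : Int) = ((0 : Nat) : Int) := rfl
  rw [h0, pvA_eq_naive str.toList _ _ 0 (Nat.zero_le _)]
  exact List.nil_append _

lemma pvB_eq (str : String) (rule : List String) :
    run_rule_alt str rule = String.mk (pvNaive str.toList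
      (PySem.List.pyGetD rule 0 "").toList (PySem.List.pyGetD rule 1 "").toList 0) := by
  by_cases hp : (PySem.List.pyGetD rule 0 "").toList = []
  · simp only [run_rule_alt, hp]
    congr 1
    rw [pvNaive_nil_pat, PySem.Str.len_eq]
    simp [PySem.List.pyRepeat]
  · simp only [run_rule_alt, if_neg hp]
    congr 1
    exact pvAltGo_eq_naive str.toList _ _ hp (str.toList.length + 1) 0 (Nat.zero_le _) (by omega)

-- ===== VERDICT (by name: the statement is the Claim_ definition above) =====
theorem run_rule_spec : Claim_equal_run_rule := by
  intro str rule _hd _hp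
  show run_rule str rule = run_rule_alt str rule
  rw [pvA_eq, pvB_eq]
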